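-- pv_equiv track=rewrite | github.com/hhsieh14/LeetcodePractice | MinimumLengthSubstrings.py | min_length_substring
-- ===== SOURCE A (Python) =====
-- def min_length_substring(s, t):
--   # Write your code here
--   table_count = {}
--   for c in t:
--     if c in table_count:
--       table_count[c] += 1
--     else:
--       table_count[c] = 1
--   table_index = {}
--
--   for i, c in enumerate(s):
--     if c in table_index:
--       table_index[c].append(i)
--     else:
--       table_index[c] = [i, ]
--
--   max_list = []
--   min_list = []
--
--   for key, value in table_count.items():
--     if key not in table_index or len(table_index[key]) < value:
--       return - 1
--     elif key in table_index and len(table_index[key]) >= value: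
--       max_list.append(table_index[key][-1 * value])
--       min_list.append(table_index[key][value - 1])
--
--   len_max = max(max_list) - min(max_list) + 1
--
--   len_min = max(min_list) - min(min_list) + 1
--
--
--   return len_max if len_max <= len_min else len_min
-- ===== SOURCE B (Python) =====
-- def _threshold_indices(pairs, need):
--     # collect the index at which each needed character's running count
--     # first reaches its required count
--     run = {}
--     out = []
--     for i, c in pairs:
--         if c in need:
--             run[c] = run.get(c, 0) + 1
--             if run[c] == need[c]:
--                 out.append(i)
--     return out
--
--
-- def min_length_substring(s, t):
--     need = {}
--     for c in t:
--         need[c] = need.get(c, 0) + 1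
--     min_list = _threshold_indices(enumerate(s), need)
--     if len(min_list) < len(need):
--         return -1
--     max_list = _threshold_indices(
--         ((i, s[i]) for i in range(len(s) - 1, -1, -1)), need)
--     return min(max(max_list) - min(max_list),
--                max(min_list) - min(min_list)) + 1
-- ===== Notes on version B (the rewrite author's own statement) =====
-- stated objective: alternative
-- what changed: Replaces A's per-character index-list dictionary and negative-index lookups by two running-counter scans (one forward, one backward over s) that record each needed character's threshold index directly; the deficiency test becomes a single length comparison.
import Mathlib
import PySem

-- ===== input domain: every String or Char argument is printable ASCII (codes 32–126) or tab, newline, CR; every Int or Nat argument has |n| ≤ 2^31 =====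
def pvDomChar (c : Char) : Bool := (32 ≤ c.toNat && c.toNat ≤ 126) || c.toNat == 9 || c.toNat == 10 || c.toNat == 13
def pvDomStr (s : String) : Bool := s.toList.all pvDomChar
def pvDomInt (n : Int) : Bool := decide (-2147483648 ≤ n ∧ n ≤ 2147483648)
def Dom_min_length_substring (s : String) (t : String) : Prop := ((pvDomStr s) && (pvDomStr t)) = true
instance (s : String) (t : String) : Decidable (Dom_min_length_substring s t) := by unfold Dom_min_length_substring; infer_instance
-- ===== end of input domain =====

-- B replaces A's per-character index-list dictionary by two running-counter scans over s
-- (forward and backward) that record each needed character's threshold index directly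
-- (objective: alternative, same asymptotic cost).

-- ===== PORT A =====
def aCountStep (d : PySem.Dict Char Int) (c : Char) : PySem.Dict Char Int :=
  if d.contains c then d.insert c (d.getD c 0 + 1) else d.insert c 1

def aIndexStep (d : PySem.Dict Char (List Int)) (p : Int × Char) : PySem.Dict Char (List Int) :=
  if d.contains p.2 then d.modify p.2 [] (fun xs => xs ++ [p.1]) else d.insert p.2 [p.1]

def aGo (ti : PySem.Dict Char (List Int)) :
    List (Char × Int) → List Int → List Int → Option (List Int × List Int)
  | [], maxL, minL => some (maxL, minL)
  | (k, v) :: rest, maxL, minL =>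
    if ti.contains k = false ∨ PySem.List.len (ti.getD k []) < v then none
    else aGo ti rest (maxL ++ [PySem.List.pyGetD (ti.getD k []) (-1 * v) 0])
                     (minL ++ [PySem.List.pyGetD (ti.getD k []) (v - 1) 0])

def min_length_substring (s : String) (t : String) : Int :=
  let table_count := t.toList.foldl aCountStep PySem.Dict.empty
  let table_index := (PySem.List.enumerate s.toList 0).foldl aIndexStep PySem.Dict.empty
  match aGo table_index table_count.items [] [] with
  | none => -1
  | some (maxL, minL) =>
    let len_max := ((PySem.List.max? maxL id).getD 0) - ((PySem.List.min? maxL id).getD 0) + 1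
    let len_min := ((PySem.List.max? minL id).getD 0) - ((PySem.List.min? minL id).getD 0) + 1
    if len_max ≤ len_min then len_max else len_min

-- ===== PORT B =====
def bStep (need : PySem.Dict Char Int) (st : PySem.Dict Char Int × List Int)
    (p : Int × Char) : PySem.Dict Char Int × List Int :=
  if need.contains p.2 then
    let run := st.1.insert p.2 (st.1.getD p.2 0 + 1)
    if run.getD p.2 0 = need.getD p.2 0 then (run, st.2 ++ [p.1]) else (run, st.2)
  else st

def thresholdIndices (pairs : List (Int × Char)) (need : PySem.Dict Char Int) : List Int :=
  (pairs.foldl (bStep need) (PySem.Dict.empty, [])).2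

def min_length_substring_alt (s : String) (t : String) : Int :=
  let need := t.toList.foldl (fun d c => d.insert c (d.getD c 0 + 1)) PySem.Dict.empty
  let minList := thresholdIndices (PySem.List.enumerate s.toList 0) need
  if PySem.List.len minList < PySem.List.len need.items then -1
  else
    let maxList := thresholdIndices
      ((PySem.List.pyRange (PySem.List.len s.toList - 1) (-1) (-1)).map
        (fun i => (i, PySem.List.pyGetD s.toList i ' '))) need
    min (((PySem.List.max? maxList id).getD 0) - ((PySem.List.min? maxList id).getD 0))
        (((PySem.List.max? minList id).getD 0) - ((PySem.List.min? minList id).getD 0)) + 1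

-- ===== PRECONDITION & SPEC =====
-- Pre_ excludes only t = "": there Python A (and B) raise ValueError (max() of an empty list).
def Pre_min_length_substring (_s : String) (t : String) : Prop := t ≠ ""
instance (s : String) (t : String) : Decidable (Pre_min_length_substring s t) := by
  unfold Pre_min_length_substring; infer_instance

def pvWitness_min_length_substring : String × String := ("ab", "b")

def Spec_min_length_substring (s : String) (t : String) (out : Int) : Prop :=
  out = min_length_substring_alt s t
instance (s : String) (t : String) (out : Int) : Decidable (Spec_min_length_substring s t out) := by
  unfold Spec_min_length_substring; infer_instance

-- ===== CLAIM (what is proved, stated in full; the proofs are below) =====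
def Claim_equal_min_length_substring : Prop :=
  ∀ (s : String) (t : String), Dom_min_length_substring s t →
    Pre_min_length_substring s t →
    Spec_min_length_substring s t (min_length_substring s t)

-- ===== LEMMAS AND PROOFS =====


def occS (l : List Char) (s0 : Int) (c : Char) : List Int :=
  ((PySem.List.enumerate l s0).filter (fun p => p.2 == c)).map (fun p => p.1)

theorem occS_cons (x : Char) (xs : List Char) (s0 : Int) (c : Char) :
    occS (x :: xs) s0 c = (if x = c then [s0] else []) ++ occS xs (s0 + 1) c := by
  simp only [occS, PySem.List.enumerate_cons, List.filter_cons]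
  by_cases h : x = c <;> simp [h]

theorem mem_occS {l : List Char} {s0 : Int} {c : Char} {i : Int} :
    i ∈ occS l s0 c ↔ ∃ k, ∃ _ : k < l.length, i = s0 + k ∧ l[k] = c := by
  simp only [occS, List.mem_map, List.mem_filter, PySem.List.mem_enumerate_iff]
  constructor
  · rintro ⟨p, ⟨⟨k, hk, rfl⟩, hc⟩, rfl⟩
    exact ⟨k, hk, rfl, by simpa using hc⟩
  · rintro ⟨k, hk, rfl, hc⟩
    exact ⟨(s0 + k, l[k]), ⟨⟨k, hk, rfl⟩, by simpa using hc⟩, rfl⟩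

theorem occS_length (l : List Char) (s0 : Int) (c : Char) :
    (occS l s0 c).length = l.count c := by
  induction l generalizing s0 with
  | nil => rfl
  | cons x xs ih =>
    rw [occS_cons]
    by_cases h : x = c <;> simp [h, ih]

theorem le_of_mem_occS {l : List Char} {s0 : Int} {c : Char} {i : Int}
    (h : i ∈ occS l s0 c) : s0 ≤ i := by
  rcases mem_occS.1 h with ⟨k, hk, rfl, -⟩
  omega

theorem le_of_getElem?_occS {l : List Char} {s0 : Int} {c : Char} {j : Nat} {i : Int}
    (h : (occS l s0 c)[j]? = some i) : s0 ≤ i :=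
  le_of_mem_occS (List.mem_of_getElem? h)

theorem occS_take_count {l : List Char} {c : Char} (s0 : Int) (k v : Nat)
    (hk : k < l.length) (hc : l[k] = c) (hv : 1 ≤ v) :
    ((l.take (k+1)).count c = v) ↔ (occS l s0 c)[v-1]? = some (s0 + k) := by
  induction l generalizing s0 k v with
  | nil => simp at hk
  | cons x xs ih =>
    rw [occS_cons]
    cases k with
    | zero =>
      simp only [List.getElem_cons_zero] at hc
      subst hc
      rw [if_pos rfl, List.singleton_append, List.getElem?_cons]
      have hcnt : ((x :: xs).take 1).count x = 1 := by simp
      constructor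
      · intro h
        have hv1 : v = 1 := by rw [hcnt] at h; omega
        subst hv1; simp
      · intro h
        by_cases h1 : v - 1 = 0
        · have : v = 1 := by omega
          subst this; simp
        · rw [if_neg h1] at h
          have := le_of_getElem?_occS h
          omega
    | succ k =>
      have hk' : k < xs.length := by simpa using hk
      have hc' : xs[k] = c := by simpa using hc
      have hmemtk : c ∈ xs.take (k+1) := by
        have h1 : k < (xs.take (k+1)).length := by simp; omega
        have := List.getElem_mem h1
        rwa [List.getElem_take, hc'] at this
      by_cases hx : x = c
      · subst hx
        rw [if_pos rfl, List.singleton_append, List.getElem?_cons]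
        have hcnt : ((x :: xs).take (k+1+1)).count x = (xs.take (k+1)).count x + 1 := by
          simp
        rw [hcnt]
        have hc1 : 1 ≤ (xs.take (k+1)).count x := List.count_pos_iff.2 hmemtk
        constructor
        · intro h
          have hv2 : 2 ≤ v := by omega
          rw [if_neg (by omega : ¬ v - 1 = 0)]
          have := (ih (s0+1) k (v-1) hk' hc' (by omega)).1 (by omega)
          have heq : v - 1 - 1 = v - 2 := by omega
          rw [heq] at this ⊢
          rw [this]
          congr 1; push_cast; ring
        · intro h
          by_cases h1 : v - 1 = 0
          · exfalso
            rw [if_pos h1] at h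
            have : s0 = s0 + ((k:Int) + 1) := by
              have := Option.some.inj h; push_cast at this ⊢; omega
            omega
          · rw [if_neg h1] at h
            push_cast at h
            have h' : (occS xs (s0+1) x)[v-1-1]? = some ((s0+1) + (k:Int)) := by
              rw [h]; congr 1; ring
            have := (ih (s0+1) k (v-1) hk' hc' (by omega)).2 h'
            omega
      · rw [if_neg hx, List.nil_append]
        have hcnt : ((x :: xs).take (k+1+1)).count c = (xs.take (k+1)).count c := by
          simp [hx]
        rw [hcnt, ih (s0+1) k v hk' hc' hv]
        have heq : ((s0+1) + (k:Int)) = s0 + ((k:Int)+1) := by ring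
        rw [heq]
        push_cast
        rfl

theorem aCount_eq (tl : List Char) :
    tl.foldl aCountStep PySem.Dict.empty = PySem.Dict.counter tl := by
  have h : aCountStep = fun d c => d.insert c (d.getD c 0 + 1) := by
    funext d c
    unfold aCountStep
    by_cases hc : d.contains c
    · simp [hc]
    · simp only [Bool.not_eq_true] at hc
      rw [if_neg (by simp [hc]), PySem.Dict.getD_of_not_contains d 0 hc]
      norm_num
  rw [h, PySem.Dict.foldl_insert_getD_add_one_eq_counter]

theorem aIndex_getD (l : List (Int × Char)) (d : PySem.Dict Char (List Int)) (c : Char) :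
    (l.foldl aIndexStep d).getD c [] =
      d.getD c [] ++ (l.filter (fun p => p.2 == c)).map (fun p => p.1) := by
  induction l generalizing d with
  | nil => simp
  | cons p l ih =>
    rw [List.foldl_cons, ih]
    have hstep : (aIndexStep d p).getD c [] =
        d.getD c [] ++ (if p.2 == c then [p.1] else []) := by
      unfold aIndexStep
      by_cases hct : d.contains p.2
      · rw [if_pos hct, PySem.Dict.getD_modify]
        by_cases hpc : c = p.2
        · subst hpc; simp
        · simp [hpc, Ne.symm hpc]
      · simp only [Bool.not_eq_true] at hct
        rw [if_neg (by simp [hct]), PySem.Dict.getD_insert]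
        by_cases hpc : c = p.2
        · subst hpc
          rw [if_pos rfl, PySem.Dict.getD_of_not_contains d [] hct]
          simp
        · simp [hpc, Ne.symm hpc]
    rw [hstep, List.filter_cons]
    by_cases hpc : p.2 = c <;> simp [hpc, List.append_assoc]

theorem aIndex_contains (l : List (Int × Char)) (d : PySem.Dict Char (List Int)) (c : Char) :
    (l.foldl aIndexStep d).contains c = (d.contains c || l.any (fun p => p.2 == c)) := by
  induction l generalizing d with
  | nil => simp
  | cons p l ih =>
    rw [List.foldl_cons, ih]
    have hstep : (aIndexStep d p).contains c = (c == p.2 || d.contains c) := by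
      unfold aIndexStep
      by_cases hct : d.contains p.2
      · rw [if_pos hct, PySem.Dict.contains_modify]
      · rw [if_neg (by simp_all), PySem.Dict.contains_insert]
    rw [hstep, List.any_cons]
    by_cases hpc : p.2 = c
    · subst hpc; simp
    · have h1 : (c == p.2) = false := by simp [Ne.symm hpc]
      have h2 : (p.2 == c) = false := by simp [hpc]
      rw [h1, h2]; simp

theorem aGo_all (ti : PySem.Dict Char (List Int)) (items : List (Char × Int))
    (maxL minL : List Int)
    (h : ∀ p ∈ items, ti.contains p.1 = true ∧ p.2 ≤ PySem.List.len (ti.getD p.1 [])) :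
    aGo ti items maxL minL =
      some (maxL ++ items.map (fun p => PySem.List.pyGetD (ti.getD p.1 []) (-1 * p.2) 0),
            minL ++ items.map (fun p => PySem.List.pyGetD (ti.getD p.1 []) (p.2 - 1) 0)) := by
  induction items generalizing maxL minL with
  | nil => simp [aGo]
  | cons p items ih =>
    obtain ⟨k, v⟩ := p
    obtain ⟨h1, h2⟩ := h (k, v) (List.mem_cons_self ..)
    simp only [] at h1 h2
    rw [PySem.List.len_eq] at h2
    rw [show aGo ti ((k, v) :: items) maxL minL =
      if ti.contains k = false ∨ PySem.List.len (ti.getD k []) < v then none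
      else aGo ti items (maxL ++ [PySem.List.pyGetD (ti.getD k []) (-1 * v) 0])
                        (minL ++ [PySem.List.pyGetD (ti.getD k []) (v - 1) 0]) from rfl]
    rw [if_neg (by simp [h1, PySem.List.len_eq]; omega)]
    rw [ih _ _ (fun q hq => h q (List.mem_cons_of_mem _ hq))]
    simp [List.append_assoc]

theorem aGo_none (ti : PySem.Dict Char (List Int)) (items : List (Char × Int))
    (maxL minL : List Int)
    (h : ∃ p ∈ items, ¬ (ti.contains p.1 = true ∧ p.2 ≤ PySem.List.len (ti.getD p.1 []))) :
    aGo ti items maxL minL = none := by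
  induction items generalizing maxL minL with
  | nil => simp at h
  | cons p items ih =>
    obtain ⟨k, v⟩ := p
    rw [show aGo ti ((k, v) :: items) maxL minL =
      if ti.contains k = false ∨ PySem.List.len (ti.getD k []) < v then none
      else aGo ti items (maxL ++ [PySem.List.pyGetD (ti.getD k []) (-1 * v) 0])
                        (minL ++ [PySem.List.pyGetD (ti.getD k []) (v - 1) 0]) from rfl]
    by_cases hc : ti.contains k = false ∨ PySem.List.len (ti.getD k []) < v
    · rw [if_pos hc]
    · rw [if_neg hc]
      apply ih
      rcases h with ⟨q, hq, hfail⟩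
      rcases List.mem_cons.1 hq with rfl | hq'
      · exfalso; rw [not_or, not_lt] at hc; refine hfail ⟨by simpa using hc.1, ?_⟩; simpa using hc.2
      · exact ⟨q, hq', hfail⟩

theorem max?_congr_mem {xs ys : List Int} (h : ∀ a : Int, a ∈ xs ↔ a ∈ ys) :
    PySem.List.max? xs id = PySem.List.max? ys id := by
  cases hx : PySem.List.max? xs id with
  | none =>
    rw [PySem.List.max?_eq_none_iff] at hx
    subst hx
    symm
    rw [PySem.List.max?_eq_none_iff]
    rcases ys with _ | ⟨y, ys⟩
    · rfl
    · exact absurd ((h y).2 (List.mem_cons_self ..)) (List.not_mem_nil)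
  | some m =>
    cases hy : PySem.List.max? ys id with
    | none =>
      rw [PySem.List.max?_eq_none_iff] at hy
      subst hy
      exact absurd ((h m).1 (PySem.List.max?_mem hx)) (List.not_mem_nil)
    | some m' =>
      have h1 : m ≤ m' := PySem.List.max?_isMax hy m ((h m).1 (PySem.List.max?_mem hx))
      have h2 : m' ≤ m := PySem.List.max?_isMax hx m' ((h m').2 (PySem.List.max?_mem hy))
      congr 1; omega

theorem min?_congr_mem {xs ys : List Int} (h : ∀ a : Int, a ∈ xs ↔ a ∈ ys) :
    PySem.List.min? xs id = PySem.List.min? ys id := by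
  cases hx : PySem.List.min? xs id with
  | none =>
    rw [PySem.List.min?_eq_none_iff] at hx
    subst hx
    symm
    rw [PySem.List.min?_eq_none_iff]
    rcases ys with _ | ⟨y, ys⟩
    · rfl
    · exact absurd ((h y).2 (List.mem_cons_self ..)) (List.not_mem_nil)
  | some m =>
    cases hy : PySem.List.min? ys id with
    | none =>
      rw [PySem.List.min?_eq_none_iff] at hy
      subst hy
      exact absurd ((h m).1 (PySem.List.min?_mem hx)) (List.not_mem_nil)
    | some m' =>
      have h1 : m ≤ m' := PySem.List.min?_isMin hx m' ((h m').2 (PySem.List.min?_mem hy))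
      have h2 : m' ≤ m := PySem.List.min?_isMin hy m ((h m).1 (PySem.List.min?_mem hx))
      congr 1; omega

theorem bfold_sublist (need : PySem.Dict Char Int) (ps : List (Int × Char))
    (run : PySem.Dict Char Int) (out : List Int) :
    (ps.foldl (bStep need) (run, out)).2.Sublist (out ++ ps.map (fun p => p.1)) := by
  induction ps generalizing run out with
  | nil => simp
  | cons p ps ih =>
    rw [List.foldl_cons, List.map_cons]
    have hsub : ∀ r' o', bStep need (run, out) p = (r', o') →
        (ps.foldl (bStep need) (r', o')).2.Sublist (out ++ p.1 :: ps.map (fun q => q.1)) := by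
      intro r' o' hstep
      have ho' : o' = out ∨ o' = out ++ [p.1] := by
        unfold bStep at hstep
        by_cases hc : need.contains p.2
        · simp only [hc, if_true] at hstep
          split at hstep <;> simp_all
        · simp only [hc] at hstep; simp_all
      have h2 := ih r' o'
      rcases ho' with rfl | rfl
      · refine h2.trans (List.Sublist.append_left ?_ _)
        exact List.sublist_cons_self _ _
      · refine h2.trans ?_
        rw [List.append_assoc]
        exact List.Sublist.append_left (by simp) _
    exact hsub _ _ rfl

theorem mem_bfold (need : PySem.Dict Char Int) (ps : List (Int × Char))
    (run : PySem.Dict Char Int) (out : List Int) (i : Int) :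
    i ∈ (ps.foldl (bStep need) (run, out)).2 ↔
      i ∈ out ∨ ∃ k, ∃ _ : k < ps.length,
        ps[k].1 = i ∧ need.contains ps[k].2 = true ∧
        run.getD ps[k].2 0 + (((ps.take (k+1)).map (fun p => p.2)).count ps[k].2 : Int)
          = need.getD ps[k].2 0 := by
  induction ps generalizing run out with
  | nil => simp
  | cons p ps ih =>
    obtain ⟨j, c⟩ := p
    have hcnt : ∀ (k : Nat) (x : Char),
        ((((j,c) :: ps).take (k+1+1)).map (fun p => p.2)).count x =
          ((ps.take (k+1)).map (fun p => p.2)).count x + (if x = c then 1 else 0) := by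
      intro k x
      rw [List.take_succ_cons, List.map_cons, List.count_cons]
      rcases eq_or_ne x c with rfl | h
      · simp
      · simp [h, Ne.symm h]
    have hget : ∀ (k : Nat) (_ : k < ps.length), (((j,c) :: ps)[k+1]'(by simpa)) = ps[k] :=
      fun k hk => rfl
    rw [List.foldl_cons]
    by_cases hc : need.contains c
    · have hstep : bStep need (run, out) (j, c) =
        (run.insert c (run.getD c 0 + 1),
         out ++ (if run.getD c 0 + 1 = need.getD c 0 then [j] else [])) := by
        unfold bStep
        simp only [hc, if_true, PySem.Dict.getD_insert_self]
        split <;> simp_all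
      rw [hstep, ih]
      constructor
      · rintro (hmem | ⟨k, hk, hi, hck, hcount⟩)
        · rcases List.mem_append.1 hmem with hmem | hmem
          · exact Or.inl hmem
          · refine Or.inr ⟨0, by simp, ?_, by simpa using hc, ?_⟩
            · split at hmem <;> simp_all
            · have h0 : run.getD c 0 + 1 = need.getD c 0 := by
                split at hmem <;> simp_all
              simpa using h0
        · refine Or.inr ⟨k+1, by simpa using hk, ?_, ?_, ?_⟩
          · rwa [hget k hk]
          · rwa [hget k hk]
          · rw [hget k hk, hcnt k ps[k].2]
            rw [PySem.Dict.getD_insert] at hcount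
            by_cases hpk : ps[k].2 = c
            · rw [if_pos hpk] at hcount
              rw [if_pos hpk]
              rw [hpk] at hcount ⊢
              push_cast at hcount ⊢
              omega
            · rw [if_neg hpk] at hcount
              rw [if_neg hpk]
              push_cast
              omega
      · rintro (hmem | ⟨k, hk, hi, hck, hcount⟩)
        · exact Or.inl (List.mem_append_left _ hmem)
        · cases k with
          | zero =>
            simp only [List.getElem_cons_zero] at hi hck hcount
            simp only [List.take_succ_cons, List.take_zero, List.map_cons, List.map_nil,
              List.count_cons, List.count_nil] at hcount
            simp only [BEq.rfl, if_true] at hcount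
            left
            apply List.mem_append_right
            rw [if_pos (by push_cast at hcount; omega)]
            simp [← hi]
          | succ k =>
            have hk' : k < ps.length := by simpa using hk
            rw [hget k hk'] at hi hck
            right
            refine ⟨k, hk', hi, hck, ?_⟩
            rw [hget k hk', hcnt k ps[k].2] at hcount
            rw [PySem.Dict.getD_insert]
            by_cases hpk : ps[k].2 = c
            · rw [if_pos hpk] at hcount
              rw [if_pos hpk]
              rw [hpk] at hcount ⊢
              push_cast at hcount ⊢
              omega
            · rw [if_neg hpk] at hcount
              rw [if_neg hpk]
              push_cast at hcount ⊢
              omega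
    · have hstep : bStep need (run, out) (j, c) = (run, out) := by
        unfold bStep; simp [hc]
      rw [hstep, ih]
      have hchar : ∀ (k : Nat) (_ : k < ps.length),
          need.contains ps[k].2 = true → ps[k].2 ≠ c := by
        intro k hk h heq; rw [heq] at h; simp_all
      constructor
      · rintro (hmem | ⟨k, hk, hi, hck, hcount⟩)
        · exact Or.inl hmem
        · refine Or.inr ⟨k+1, by simpa using hk, ?_, ?_, ?_⟩
          · rwa [hget k hk]
          · rwa [hget k hk]
          · rw [hget k hk, hcnt k ps[k].2, if_neg (hchar k hk hck)]
            push_cast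
            omega
      · rintro (hmem | ⟨k, hk, hi, hck, hcount⟩)
        · exact Or.inl hmem
        · cases k with
          | zero =>
            simp only [List.getElem_cons_zero] at hck
            simp_all
          | succ k =>
            have hk' : k < ps.length := by simpa using hk
            rw [hget k hk'] at hi hck hcount
            right
            refine ⟨k, hk', hi, hck, ?_⟩
            rw [hcnt k ps[k].2, if_neg (hchar k hk' hck)] at hcount
            push_cast at hcount ⊢
            omega


-- P2: the (count-v)-th entry of occS is the position where the suffix count equals v
theorem occS_drop_count {l : List Char} {c : Char} (s0 : Int) (k v : Nat)
    (hk : k < l.length) (hc : l[k] = c) (_hv : 1 ≤ v) (hvc : v ≤ l.count c) :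
    ((l.drop k).count c = v) ↔ (occS l s0 c)[l.count c - v]? = some (s0 + k) := by
  have hsplit : (l.take (k+1)).count c + (l.drop (k+1)).count c = l.count c := by
    rw [← List.count_append, List.take_append_drop]
  have hdropc : (l.drop k).count c = (l.drop (k+1)).count c + 1 := by
    rw [List.drop_eq_getElem_cons hk, List.count_cons, hc]
    simp
  have hP1 := occS_take_count (l := l) (c := c) s0 k (l.count c - v + 1) hk hc (by omega)
  have hidx : l.count c - v + 1 - 1 = l.count c - v := by omega
  rw [hidx] at hP1
  constructor
  · intro h
    exact hP1.1 (by omega)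
  · intro h
    have := hP1.2 h
    omega

-- canonical per-character threshold lists (proof helpers)
def minC (l tl : List Char) : List Int :=
  ((PySem.Set.ofList tl).filter (fun c => decide (tl.count c ≤ l.count c))).map
    (fun c => (occS l 0 c).getD (tl.count c - 1) 0)

def maxC (l tl : List Char) : List Int :=
  ((PySem.Set.ofList tl).filter (fun c => decide (tl.count c ≤ l.count c))).map
    (fun c => (occS l 0 c).getD (l.count c - tl.count c) 0)

theorem minC_spec (l tl : List Char) (c : Char) (hmem : c ∈ tl)
    (hsuff : tl.count c ≤ l.count c) :
    ∃ k, ∃ _ : k < l.length, (occS l 0 c).getD (tl.count c - 1) 0 = (k:Int) ∧ l[k] = c ∧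
      (l.take (k+1)).count c = tl.count c := by
  have hv : 1 ≤ tl.count c := List.count_pos_iff.2 hmem
  have hlen : (occS l 0 c).length = l.count c := occS_length l 0 c
  have hidx : tl.count c - 1 < (occS l 0 c).length := by omega
  have hsome : (occS l 0 c)[tl.count c - 1]? = some ((occS l 0 c)[tl.count c - 1]) :=
    List.getElem?_eq_getElem hidx
  have hmem2 : (occS l 0 c)[tl.count c - 1] ∈ occS l 0 c := List.getElem_mem hidx
  rcases mem_occS.1 hmem2 with ⟨k, hk, he, hck⟩
  refine ⟨k, hk, ?_, hck, ?_⟩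
  · rw [List.getD_eq_getElem?_getD, hsome, Option.getD_some, he]
    simp
  · exact (occS_take_count 0 k (tl.count c) hk hck hv).2 (by rw [hsome, he])

theorem maxC_spec (l tl : List Char) (c : Char) (hmem : c ∈ tl)
    (hsuff : tl.count c ≤ l.count c) :
    ∃ k, ∃ _ : k < l.length, (occS l 0 c).getD (l.count c - tl.count c) 0 = (k:Int) ∧ l[k] = c ∧
      (l.drop k).count c = tl.count c := by
  have hv : 1 ≤ tl.count c := List.count_pos_iff.2 hmem
  have hlen : (occS l 0 c).length = l.count c := occS_length l 0 c
  have hidx : l.count c - tl.count c < (occS l 0 c).length := by omega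
  have hsome : (occS l 0 c)[l.count c - tl.count c]? =
      some ((occS l 0 c)[l.count c - tl.count c]) := List.getElem?_eq_getElem hidx
  have hmem2 : (occS l 0 c)[l.count c - tl.count c] ∈ occS l 0 c := List.getElem_mem hidx
  rcases mem_occS.1 hmem2 with ⟨k, hk, he, hck⟩
  refine ⟨k, hk, ?_, hck, ?_⟩
  · rw [List.getD_eq_getElem?_getD, hsome, Option.getD_some, he]
    simp
  · exact (occS_drop_count 0 k (tl.count c) hk hck hv hsuff).2 (by rw [hsome, he])

theorem mem_minC (l tl : List Char) (i : Int) :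
    i ∈ minC l tl ↔ ∃ c, c ∈ tl ∧ tl.count c ≤ l.count c ∧
      i = (occS l 0 c).getD (tl.count c - 1) 0 := by
  simp [minC, List.mem_filter, PySem.Set.mem_ofList, eq_comm]
  tauto

theorem mem_maxC (l tl : List Char) (i : Int) :
    i ∈ maxC l tl ↔ ∃ c, c ∈ tl ∧ tl.count c ≤ l.count c ∧
      i = (occS l 0 c).getD (l.count c - tl.count c) 0 := by
  simp [maxC, List.mem_filter, PySem.Set.mem_ofList, eq_comm]
  tauto

theorem nodup_minC (l tl : List Char) : (minC l tl).Nodup := by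
  refine List.Nodup.map_on ?_ ((PySem.Set.nodup_ofList tl).filter _)
  intro c1 h1 c2 h2 heq
  rcases List.mem_filter.1 h1 with ⟨hm1, hs1⟩
  rcases List.mem_filter.1 h2 with ⟨hm2, hs2⟩
  rcases minC_spec l tl c1 ((PySem.Set.mem_ofList _ _).1 hm1) (by simpa using hs1) with
    ⟨k1, hk1, he1, hc1, -⟩
  rcases minC_spec l tl c2 ((PySem.Set.mem_ofList _ _).1 hm2) (by simpa using hs2) with
    ⟨k2, hk2, he2, hc2, -⟩
  rw [heq, he2] at he1
  have : k2 = k1 := by exact_mod_cast he1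
  subst this
  rw [← hc1, ← hc2]

theorem nodup_maxC (l tl : List Char) : (maxC l tl).Nodup := by
  refine List.Nodup.map_on ?_ ((PySem.Set.nodup_ofList tl).filter _)
  intro c1 h1 c2 h2 heq
  rcases List.mem_filter.1 h1 with ⟨hm1, hs1⟩
  rcases List.mem_filter.1 h2 with ⟨hm2, hs2⟩
  rcases maxC_spec l tl c1 ((PySem.Set.mem_ofList _ _).1 hm1) (by simpa using hs1) with
    ⟨k1, hk1, he1, hc1, -⟩
  rcases maxC_spec l tl c2 ((PySem.Set.mem_ofList _ _).1 hm2) (by simpa using hs2) with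
    ⟨k2, hk2, he2, hc2, -⟩
  rw [heq, he2] at he1
  have : k2 = k1 := by exact_mod_cast he1
  subst this
  rw [← hc1, ← hc2]

-- B's forward scan, in terms of the string
theorem Bmin_mem (l tl : List Char) (i : Int) :
    i ∈ thresholdIndices (PySem.List.enumerate l 0) (PySem.Dict.counter tl) ↔
      ∃ k, ∃ _ : k < l.length, (k:Int) = i ∧ l[k] ∈ tl ∧
        (l.take (k+1)).count l[k] = tl.count l[k] := by
  unfold thresholdIndices
  rw [mem_bfold]
  simp only [List.not_mem_nil, false_or]
  have hmap : ∀ k : Nat, ((PySem.List.enumerate l 0).take (k+1)).map (fun p => p.2) =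
      l.take (k+1) := by
    intro k; rw [List.map_take, PySem.List.map_snd_enumerate]
  constructor
  · rintro ⟨k, hk, hi, hck, hcount⟩
    have hk' : k < l.length := by
      simpa [PySem.List.length_enumerate] using hk
    rw [PySem.List.getElem_enumerate _ _ _ hk] at hi hck hcount
    simp only at hi hck hcount
    rw [hmap k, PySem.Dict.getD_empty, PySem.Dict.getD_counter] at hcount
    rw [PySem.Dict.contains_counter] at hck
    refine ⟨k, hk', by simpa using hi, by simpa using hck, ?_⟩
    omega
  · rintro ⟨k, hk', hi, hmem, hcnt⟩
    have hk : k < (PySem.List.enumerate l 0).length := by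
      simpa [PySem.List.length_enumerate] using hk'
    refine ⟨k, hk, ?_, ?_, ?_⟩
    · rw [PySem.List.getElem_enumerate _ _ _ hk]
      simpa using hi
    · rw [PySem.List.getElem_enumerate _ _ _ hk]
      simpa [PySem.Dict.contains_counter] using hmem
    · rw [PySem.List.getElem_enumerate _ _ _ hk]
      simp only
      rw [hmap k, PySem.Dict.getD_empty, PySem.Dict.getD_counter]
      omega

-- B's backward scan, in terms of the string
theorem Bmax_mem (l tl : List Char) (i : Int) :
    i ∈ thresholdIndices ((PySem.List.enumerate l 0).reverse) (PySem.Dict.counter tl) ↔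
      ∃ k, ∃ _ : k < l.length, (k:Int) = i ∧ l[k] ∈ tl ∧
        (l.drop k).count l[k] = tl.count l[k] := by
  unfold thresholdIndices
  rw [mem_bfold]
  simp only [List.not_mem_nil, false_or]
  have hlen : ((PySem.List.enumerate l 0).reverse).length = l.length := by
    simp [PySem.List.length_enumerate]
  have hget : ∀ (k : Nat) (hk : k < l.length),
      ((PySem.List.enumerate l 0).reverse[k]'(by omega)) =
        ((((l.length - 1 - k : Nat)) : Int), l[l.length - 1 - k]'(by omega)) := by
    intro k hk
    rw [List.getElem_reverse]
    rw [PySem.List.getElem_enumerate]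
    simp [PySem.List.length_enumerate]
  have hmap : ∀ k : Nat, k < l.length →
      (((PySem.List.enumerate l 0).reverse.take (k+1)).map (fun p => p.2)) =
        (l.drop (l.length - 1 - k)).reverse := by
    intro k hk
    rw [List.map_take, List.map_reverse, PySem.List.map_snd_enumerate, List.take_reverse]
    rw [show l.length - (k+1) = l.length - 1 - k from by omega]
  constructor
  · rintro ⟨k, hk, hi, hck, hcount⟩
    have hk' : k < l.length := hlen ▸ hk
    rw [hget k hk'] at hi hck hcount
    simp only at hi hck hcount
    rw [hmap k hk', List.count_reverse, PySem.Dict.getD_empty,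
      PySem.Dict.getD_counter] at hcount
    rw [PySem.Dict.contains_counter] at hck
    refine ⟨l.length - 1 - k, by omega, hi, by simpa using hck, by omega⟩
  · rintro ⟨j, hj, hi, hmem, hcnt⟩
    refine ⟨l.length - 1 - j, by omega, ?_, ?_, ?_⟩
    · rw [hget _ (by omega)]
      simp only
      simp only [show l.length - 1 - (l.length - 1 - j) = j from by omega]
      exact hi
    · rw [hget _ (by omega)]
      simp only
      simp only [show l.length - 1 - (l.length - 1 - j) = j from by omega]
      simpa [PySem.Dict.contains_counter] using hmem
    · rw [hget _ (by omega)]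
      simp only
      rw [hmap _ (by omega), List.count_reverse, PySem.Dict.getD_empty,
        PySem.Dict.getD_counter]
      simp only [show l.length - 1 - (l.length - 1 - j) = j from by omega]
      omega

-- the pair list of B's backward loop is the reversed enumeration
theorem Brev_eq (l : List Char) :
    (PySem.List.pyRange (PySem.List.len l - 1) (-1) (-1)).map
        (fun i => (i, PySem.List.pyGetD l i ' ')) = (PySem.List.enumerate l 0).reverse := by
  rw [PySem.List.len_eq, PySem.List.pyRange_neg_one_eq_reverse]
  rw [show ((-1 : Int) + 1) = 0 by ring, show ((l.length : Int) - 1 + 1) = (l.length : Int) by ring]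
  rw [List.map_reverse]
  congr 1
  have h := PySem.List.enumerate_eq_map_pyRange l ' '
  rw [PySem.List.len_eq] at h
  exact h.symm

theorem Bmin_iff_minC (l tl : List Char) (i : Int) :
    i ∈ thresholdIndices (PySem.List.enumerate l 0) (PySem.Dict.counter tl) ↔ i ∈ minC l tl := by
  rw [Bmin_mem, mem_minC]
  constructor
  · rintro ⟨k, hk, rfl, hmem, hcnt⟩
    refine ⟨l[k], hmem, le_trans (hcnt ▸ (List.take_sublist _ _).count_le _) le_rfl, ?_⟩
    have := (occS_take_count (l := l) (c := l[k]) 0 k (tl.count l[k]) hk rfl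
      (List.count_pos_iff.2 hmem)).1 hcnt
    rw [List.getD_eq_getElem?_getD, this]
    simp
  · rintro ⟨c, hmem, hsuff, rfl⟩
    rcases minC_spec l tl c hmem hsuff with ⟨k, hk, he, hck, hcnt⟩
    exact ⟨k, hk, he.symm, hck ▸ hmem, by rw [hck]; exact hcnt⟩

theorem Bmax_iff_maxC (l tl : List Char) (i : Int) :
    i ∈ thresholdIndices ((PySem.List.enumerate l 0).reverse) (PySem.Dict.counter tl) ↔
      i ∈ maxC l tl := by
  rw [Bmax_mem, mem_maxC]
  constructor
  · rintro ⟨k, hk, rfl, hmem, hcnt⟩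
    have hsuff : tl.count l[k] ≤ l.count l[k] := by
      rw [← hcnt]
      exact (List.drop_sublist _ _).count_le _
    refine ⟨l[k], hmem, hsuff, ?_⟩
    have := (occS_drop_count (l := l) (c := l[k]) 0 k (tl.count l[k]) hk rfl
      (List.count_pos_iff.2 hmem) hsuff).1 hcnt
    rw [List.getD_eq_getElem?_getD, this]
    simp
  · rintro ⟨c, hmem, hsuff, rfl⟩
    rcases maxC_spec l tl c hmem hsuff with ⟨k, hk, he, hck, hcnt⟩
    exact ⟨k, hk, he.symm, hck ▸ hmem, by rw [hck]; exact hcnt⟩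

theorem nodup_Bmin (l : List Char) (need : PySem.Dict Char Int) :
    (thresholdIndices (PySem.List.enumerate l 0) need).Nodup := by
  have h := bfold_sublist need (PySem.List.enumerate l 0) PySem.Dict.empty []
  rw [List.nil_append, PySem.List.map_fst_enumerate] at h
  exact h.nodup (PySem.List.nodup_pyRange_one 0 (0 + l.length))

theorem nodup_Bmax (l : List Char) (need : PySem.Dict Char Int) :
    (thresholdIndices ((PySem.List.enumerate l 0).reverse) need).Nodup := by
  have h := bfold_sublist need ((PySem.List.enumerate l 0).reverse) PySem.Dict.empty []
  rw [List.nil_append, List.map_reverse, PySem.List.map_fst_enumerate] at h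
  exact h.nodup (List.nodup_reverse.2 (PySem.List.nodup_pyRange_one 0 (0 + l.length)))


-- ===== VERDICT (by name: the statement is the Claim_ definition above) =====
theorem min_length_substring_spec : Claim_equal_min_length_substring := by
  intro s t _ _
  unfold Spec_min_length_substring
  show min_length_substring s t = min_length_substring_alt s t
  simp only [min_length_substring, min_length_substring_alt]
  rw [aCount_eq, PySem.Dict.foldl_insert_getD_add_one_eq_counter, Brev_eq,
    PySem.Dict.items_counter]
  set l := s.toList with hl
  set tl := t.toList with htl
  have hti_getD : ∀ c : Char,
      ((PySem.List.enumerate l 0).foldl aIndexStep PySem.Dict.empty).getD c [] = occS l 0 c := by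
    intro c
    rw [aIndex_getD, PySem.Dict.getD_empty, List.nil_append]
    rfl
  have hti_mem : ∀ c : Char,
      ((PySem.List.enumerate l 0).foldl aIndexStep PySem.Dict.empty).contains c = true ↔
        c ∈ l := by
    intro c
    rw [aIndex_contains]
    simp only [PySem.Dict.contains_empty, Bool.false_or, List.any_eq_true]
    constructor
    · rintro ⟨p, hp, hbeq⟩
      rcases (PySem.List.mem_enumerate_iff _ _ _).1 hp with ⟨k, hk, rfl⟩
      simp only [beq_iff_eq] at hbeq
      exact hbeq ▸ List.getElem_mem hk
    · intro hmem
      rcases List.mem_iff_getElem.1 hmem with ⟨k, hk, rfl⟩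
      exact ⟨((0:Int)+k, l[k]), (PySem.List.mem_enumerate_iff _ _ _).2 ⟨k, hk, rfl⟩, by simp⟩
  have hpermMin : (thresholdIndices (PySem.List.enumerate l 0)
      (PySem.Dict.counter tl)).Perm (minC l tl) :=
    (List.perm_ext_iff_of_nodup (nodup_Bmin l _) (nodup_minC l tl)).2
      (fun i => Bmin_iff_minC l tl i)
  by_cases hsuff : ∀ c ∈ tl, tl.count c ≤ l.count c
  · -- every required character occurs often enough: both sides take the value branch
    have hfilter : (PySem.Set.ofList tl).filter
        (fun c => decide (tl.count c ≤ l.count c)) = PySem.Set.ofList tl :=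
      List.filter_eq_self.2 (fun c hc => by
        simpa using hsuff c ((PySem.Set.mem_ofList _ _).1 hc))
    have hmemc : ∀ c ∈ PySem.Set.ofList tl, c ∈ l := by
      intro c hc
      have hmemtl := (PySem.Set.mem_ofList _ _).1 hc
      have h1 : 1 ≤ tl.count c := List.count_pos_iff.2 hmemtl
      exact List.count_pos_iff.1 (lt_of_lt_of_le h1 (hsuff c hmemtl))
    rw [aGo_all _ _ _ _ (by
      rintro p hp
      rcases List.mem_map.1 hp with ⟨c, hc, rfl⟩
      refine ⟨(hti_mem c).2 (hmemc c hc), ?_⟩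
      rw [hti_getD c, PySem.List.len_eq, occS_length]
      change (tl.count c : Int) ≤ (l.count c : Int)
      exact_mod_cast hsuff c ((PySem.Set.mem_ofList _ _).1 hc))]
    have hAmax : (List.map (fun c => (c, (tl.count c : Int))) (PySem.Set.ofList tl)).map
        (fun p => PySem.List.pyGetD
          (((PySem.List.enumerate l 0).foldl aIndexStep PySem.Dict.empty).getD p.1 [])
          (-1 * p.2) 0) = maxC l tl := by
      rw [List.map_map]
      unfold maxC
      rw [hfilter]
      refine List.map_congr_left (fun c hc => ?_)
      simp only [Function.comp]
      rw [hti_getD c]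
      have h1 : 1 ≤ tl.count c := List.count_pos_iff.2 ((PySem.Set.mem_ofList _ _).1 hc)
      have h2 : tl.count c ≤ (occS l 0 c).length := by
        rw [occS_length]; exact hsuff c ((PySem.Set.mem_ofList _ _).1 hc)
      rw [show (-1 * (tl.count c : Int)) = -((tl.count c : Nat) : Int) by ring]
      rw [PySem.List.pyGetD_neg_natCast _ _ _ h1 h2]
      rw [List.getD_eq_getElem?_getD,
        List.getElem?_eq_getElem (by
          rw [occS_length]
          have := hsuff c ((PySem.Set.mem_ofList _ _).1 hc)
          omega : l.count c - tl.count c < (occS l 0 c).length)]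
      simp only [Option.getD_some]
      congr 1
      rw [occS_length]
    have hAmin : (List.map (fun c => (c, (tl.count c : Int))) (PySem.Set.ofList tl)).map
        (fun p => PySem.List.pyGetD
          (((PySem.List.enumerate l 0).foldl aIndexStep PySem.Dict.empty).getD p.1 [])
          (p.2 - 1) 0) = minC l tl := by
      rw [List.map_map]
      unfold minC
      rw [hfilter]
      refine List.map_congr_left (fun c hc => ?_)
      simp only [Function.comp]
      rw [hti_getD c]
      have h1 : 1 ≤ tl.count c := List.count_pos_iff.2 ((PySem.Set.mem_ofList _ _).1 hc)
      rw [show ((tl.count c : Int) - 1) = ((tl.count c - 1 : Nat) : Int) by omega]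
      rw [PySem.List.pyGetD_natCast]
    simp only [List.nil_append, hAmax, hAmin]
    have hlenB : ¬ (PySem.List.len (thresholdIndices (PySem.List.enumerate l 0)
        (PySem.Dict.counter tl)) <
        PySem.List.len ((PySem.Set.ofList tl).map (fun k => (k, (tl.count k : Int))))) := by
      rw [PySem.List.len_eq, PySem.List.len_eq, List.length_map, hpermMin.length_eq]
      unfold minC
      rw [hfilter, List.length_map]
      omega
    rw [if_neg hlenB]
    have hmaxPerm : (thresholdIndices ((PySem.List.enumerate l 0).reverse)
        (PySem.Dict.counter tl)).Perm (maxC l tl) :=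
      (List.perm_ext_iff_of_nodup (nodup_Bmax l _) (nodup_maxC l tl)).2
        (fun i => Bmax_iff_maxC l tl i)
    have e1 : PySem.List.max? (thresholdIndices ((PySem.List.enumerate l 0).reverse)
        (PySem.Dict.counter tl)) id = PySem.List.max? (maxC l tl) id :=
      max?_congr_mem (fun a => Bmax_iff_maxC l tl a)
    have e2 : PySem.List.min? (thresholdIndices ((PySem.List.enumerate l 0).reverse)
        (PySem.Dict.counter tl)) id = PySem.List.min? (maxC l tl) id :=
      min?_congr_mem (fun a => Bmax_iff_maxC l tl a)
    have e3 : PySem.List.max? (thresholdIndices (PySem.List.enumerate l 0)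
        (PySem.Dict.counter tl)) id = PySem.List.max? (minC l tl) id :=
      max?_congr_mem (fun a => Bmin_iff_minC l tl a)
    have e4 : PySem.List.min? (thresholdIndices (PySem.List.enumerate l 0)
        (PySem.Dict.counter tl)) id = PySem.List.min? (minC l tl) id :=
      min?_congr_mem (fun a => Bmin_iff_minC l tl a)
    rw [e1, e2, e3, e4, min_def]
    split_ifs <;> omega
  · -- some required character is missing or too rare: both sides return -1
    simp only [not_forall, not_le] at hsuff
    rcases hsuff with ⟨c, hcmem, hlt⟩
    rw [aGo_none _ _ _ _ ⟨(c, (tl.count c : Int)),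
      List.mem_map.2 ⟨c, (PySem.Set.mem_ofList _ _).2 hcmem, rfl⟩, by
        rintro ⟨hco, hle⟩
        rw [hti_getD c, PySem.List.len_eq, occS_length] at hle
        have hle' : (tl.count c : Int) ≤ (l.count c : Int) := hle
        have : tl.count c ≤ l.count c := by exact_mod_cast hle'
        omega⟩]
    rw [if_pos (by
      rw [PySem.List.len_eq, PySem.List.len_eq, List.length_map, hpermMin.length_eq]
      unfold minC
      have hflt : ((PySem.Set.ofList tl).filter
          (fun c => decide (tl.count c ≤ l.count c))).length <
          (PySem.Set.ofList tl).length :=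
        List.length_filter_lt_length_iff_exists.2
          ⟨c, (PySem.Set.mem_ofList _ _).2 hcmem, by simp; omega⟩
      rw [List.length_map]
      exact_mod_cast hflt)]
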